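-- pv_equiv track=rewrite | github.com/prohwww/CatchPython | implement/implement002.py | GetTime2
-- ===== SOURCE A (Python) =====
-- def GetTime2(n):
--     count = 0
--     for i in range(n + 1):
--         for j in range(60):
--             for k in range(60):
--                 if '3' in str(i) + str(j) + str(k):
--                     count += 1
--     return count
-- ===== SOURCE B (Python) =====
-- # Closed-form: each hour value i contributes 3600 if str(i) contains '3', else 1575
-- # (the number of (j,k) minute/second pairs containing a '3'); count no-'3' numbers in
-- # [0, n] by a per-digit recursion instead of enumerating all n*3600 triples.
--
-- def _has3(m):
--     while m > 0:
--         if m % 10 == 3: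
--             return True
--         m //= 10
--     return False
--
-- def _no3(m):
--     # count of x in [0, m] whose decimal digits avoid 3 (m >= 0)
--     if m < 10:
--         return m + 1 if m < 3 else m
--     q, d = divmod(m, 10)
--     res = 9 * _no3(q - 1)
--     if not _has3(q):
--         res += d + 1 if d < 3 else d
--     return res
--
-- def GetTime2(n):
--     if n < 0:
--         return 0
--     return 3600 * (n + 1) - 2025 * _no3(n)
-- ===== Notes on version B (the rewrite author's own statement) =====
-- stated objective: faster
-- what changed: Replaces the triple loop over every (hour, minute, second) combination by a closed form: a per-digit recursion counts the hours in [0, n] whose decimal digits avoid the digit three; such an hour contributes only the minute/second pairs that themselves contain that digit, every other hour contributes all of them.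
import Mathlib
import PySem

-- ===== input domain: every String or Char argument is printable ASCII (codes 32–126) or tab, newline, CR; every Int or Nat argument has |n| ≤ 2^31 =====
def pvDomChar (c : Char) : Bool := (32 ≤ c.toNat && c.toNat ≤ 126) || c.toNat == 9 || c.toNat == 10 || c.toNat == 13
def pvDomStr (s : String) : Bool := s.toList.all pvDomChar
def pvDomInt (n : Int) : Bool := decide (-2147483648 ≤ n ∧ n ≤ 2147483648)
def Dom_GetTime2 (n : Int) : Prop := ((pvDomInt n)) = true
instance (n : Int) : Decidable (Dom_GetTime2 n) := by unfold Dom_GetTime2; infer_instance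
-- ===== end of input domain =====

-- B replaces A's enumeration of all (hour, minute, second) triples by a closed form: a digit
-- recursion counts the hours in [0, n] with no digit '3'; each such hour contributes 1575
-- '3'-containing minute/second pairs and every other hour all 3600 of them.

-- ===== PORT A =====
def GetTime2 (n : Int) : Int :=
  (PySem.List.pyRange 0 (n + 1) 1).foldl (fun count i =>
    (PySem.List.pyRange 0 60 1).foldl (fun count j =>
      (PySem.List.pyRange 0 60 1).foldl (fun count k =>
        if PySem.Chars.isIn ['3']
            (PySem.Int.toChars i ++ PySem.Int.toChars j ++ PySem.Int.toChars k) then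
          count + 1
        else count) count) count) 0

-- ===== PORT B =====
-- _has3(m): 'while m > 0: if m % 10 == 3: return True; m //= 10', ported with fuel m
-- (m strictly decreases on every pass, so fuel m is always sufficient)
def pvHas3Go : Nat → Nat → Bool
  | _, 0 => false
  | 0, _ + 1 => false
  | f + 1, m + 1 => if (m + 1) % 10 = 3 then true else pvHas3Go f ((m + 1) / 10)

def pvHas3 (m : Nat) : Bool := pvHas3Go m m

-- _no3(m): count of x in [0, m] whose decimal digits avoid 3 (called with m ≥ 0 only)
def pvNo3 (m : Nat) : Nat :=
  if m < 10 then (if m < 3 then m + 1 else m)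
  else
    9 * pvNo3 (m / 10 - 1) +
      (if pvHas3 (m / 10) then 0 else (if m % 10 < 3 then m % 10 + 1 else m % 10))
decreasing_by exact lt_of_lt_of_le (by omega) (Nat.div_le_self m 10)

def GetTime2_alt (n : Int) : Int :=
  if n < 0 then 0
  else 3600 * (n + 1) - 2025 * (pvNo3 n.toNat : Int)

-- ===== PRECONDITION & SPEC =====
def Spec_GetTime2 (n : Int) (out : Int) : Prop := out = GetTime2_alt n
instance (n : Int) (out : Int) : Decidable (Spec_GetTime2 n out) := by unfold Spec_GetTime2; infer_instance

-- ===== CLAIM (what is proved, stated in full; the proofs are below) =====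
def Claim_equal_GetTime2 : Prop := ∀ (n : Int), Dom_GetTime2 n → Spec_GetTime2 n (GetTime2 n)

-- ===== LEMMAS AND PROOFS =====

theorem pvHas3Go_congr : ∀ (f f' m : Nat), m ≤ f → m ≤ f' → pvHas3Go f m = pvHas3Go f' m := by
  intro f
  induction f with
  | zero =>
    intro f' m h _
    interval_cases m
    cases f' <;> rfl
  | succ f ih =>
    intro f' m hf hf'
    cases m with
    | zero => cases f' <;> rfl
    | succ k =>
      cases f' with
      | zero => omega
      | succ f0 =>
        show (if (k + 1) % 10 = 3 then true else pvHas3Go f ((k + 1) / 10))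
           = (if (k + 1) % 10 = 3 then true else pvHas3Go f0 ((k + 1) / 10))
        by_cases h3 : (k + 1) % 10 = 3
        · simp [h3]
        · simp only [h3, if_false]
          exact ih f0 ((k + 1) / 10) (by omega) (by omega)

-- the recurrence of the while loop in _has3, independent of the fuel
theorem pvHas3_eq (m : Nat) :
    pvHas3 m = if m = 0 then false else if m % 10 = 3 then true else pvHas3 (m / 10) := by
  cases m with
  | zero => rfl
  | succ k =>
    show pvHas3Go (k + 1) (k + 1) = _
    simp only [Nat.succ_ne_zero, if_false]
    show (if (k + 1) % 10 = 3 then true else pvHas3Go k ((k + 1) / 10)) = _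
    by_cases h3 : (k + 1) % 10 = 3
    · simp [h3]
    · simp only [h3, if_false]
      exact pvHas3Go_congr k ((k + 1) / 10) ((k + 1) / 10) (by omega) (le_refl _)

theorem pv_isIn_single (s : List Char) : PySem.Chars.isIn ['3'] s = true ↔ '3' ∈ s := by
  rw [PySem.Chars.isIn_iff_infix, List.singleton_infix_iff]

theorem pv_digitChar_eq_three {d : Nat} (hd : d < 10) : (Nat.digitChar d = '3') ↔ d = 3 := by
  interval_cases d <;> simp [Nat.digitChar]

theorem pv_mem_toDigitsCore (f : Nat) : ∀ (n : Nat) (l : List Char), n < 10 ^ f →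
    ('3' ∈ Nat.toDigitsCore 10 f n l ↔ pvHas3 n = true ∨ '3' ∈ l) := by
  induction f with
  | zero =>
    intro n l hn
    have : n = 0 := by omega
    subst this
    simp [Nat.toDigitsCore, pvHas3, pvHas3Go]
  | succ f ih =>
    intro n l hn
    rw [Nat.toDigitsCore]
    by_cases h0 : n / 10 = 0
    · have hn10 : n < 10 := by omega
      simp only [h0, if_true, List.mem_cons]
      rw [pvHas3_eq]
      rcases Nat.eq_zero_or_pos n with h | h
      · subst h; simp [Nat.digitChar]
      · have : ¬ n = 0 := by omega
        simp only [this, if_false]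
        have hm : n % 10 = n := Nat.mod_eq_of_lt hn10
        constructor
        · rintro (hc | hc)
          · left
            have := (pv_digitChar_eq_three (d := n % 10) (by omega)).mp hc.symm
            simp [this]
          · right; exact hc
        · rintro (hc | hc)
          · left
            have h3 : n % 10 = 3 := by
              by_contra h3
              simp [h3, Nat.div_eq_of_lt hn10, pvHas3, pvHas3Go] at hc
            exact ((pv_digitChar_eq_three (d := n % 10) (by omega)).mpr h3).symm
          · right; exact hc
    · simp only [h0, if_false]
      have hlt : n / 10 < 10 ^ f := by
        rw [Nat.div_lt_iff_lt_mul (by omega)]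
        calc n < 10 ^ (f + 1) := hn
        _ = 10 ^ f * 10 := by ring
      rw [ih (n / 10) _ hlt]
      have hne : ¬ n = 0 := by
        intro h; subst h; simp at h0
      simp only [List.mem_cons]
      by_cases h3 : n % 10 = 3
      · have hp : pvHas3 n = true := by rw [pvHas3_eq]; simp [hne, h3]
        simp only [hp, true_or, iff_true]
        right; left
        exact ((pv_digitChar_eq_three (d := n % 10) (by omega)).mpr h3).symm
      · have hp : pvHas3 n = pvHas3 (n / 10) := by rw [pvHas3_eq]; simp [hne, h3]
        rw [hp]
        constructor
        · rintro (hc | hc | hc)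
          · left; exact hc
          · exfalso; exact h3 ((pv_digitChar_eq_three (d := n % 10) (by omega)).mp hc.symm)
          · right; exact hc
        · rintro (hc | hc)
          · left; exact hc
          · right; right; exact hc

theorem pv_mem_toDigits (m : Nat) : '3' ∈ Nat.toDigits 10 m ↔ pvHas3 m = true := by
  have h : m < 10 ^ (m + 1) := by
    calc m < 2 ^ m := Nat.lt_two_pow_self
    _ ≤ 10 ^ m := Nat.pow_le_pow_left (by omega) m
    _ ≤ 10 ^ (m + 1) := Nat.pow_le_pow_right (by omega) (by omega)
  rw [Nat.toDigits, pv_mem_toDigitsCore (m + 1) m [] h]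
  simp

theorem pv_isIn_toChars {i : Int} (hi : 0 ≤ i) (s : List Char) :
    PySem.Chars.isIn ['3'] (PySem.Int.toChars i ++ s)
      = (pvHas3 i.toNat || PySem.Chars.isIn ['3'] s) := by
  have hnot : ¬ i < 0 := by omega
  rcases Bool.eq_false_or_eq_true (pvHas3 i.toNat || PySem.Chars.isIn ['3'] s) with h | h <;> rw [h]
  · rw [pv_isIn_single, List.mem_append]
    rcases Bool.or_eq_true_iff.mp h with hc | hc
    · left
      rw [PySem.Int.toChars, if_neg hnot, pv_mem_toDigits]
      exact hc
    · right
      exact (pv_isIn_single s).mp hc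
  · rw [Bool.eq_false_iff, Ne, pv_isIn_single, List.mem_append]
    simp only [Bool.or_eq_false_iff] at h
    rintro (hc | hc)
    · rw [PySem.Int.toChars, if_neg hnot] at hc
      rw [pv_mem_toDigits] at hc
      simp [hc] at h
    · rw [← pv_isIn_single] at hc
      simp [hc] at h

-- the minute/second double loop once the '3'-test has been reduced to Booleans
theorem pv_inner (a : Bool) (acc : Int) :
    (PySem.List.pyRange 0 60 1).foldl (fun count j =>
      (PySem.List.pyRange 0 60 1).foldl (fun count k =>
        if (a || pvHas3 j.toNat || pvHas3 k.toNat) then count + 1 else count) count) acc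
    = acc + (if a then 3600 else 1575) := by
  have h1 : (PySem.List.pyRange 0 60 1).foldl (fun count j =>
      (PySem.List.pyRange 0 60 1).foldl (fun count k =>
        if (a || pvHas3 j.toNat || pvHas3 k.toNat) then count + 1 else count) count) acc
      = (PySem.List.pyRange 0 60 1).foldl (fun count j => count +
          ((PySem.List.pyRange 0 60 1).countP
            (fun k => a || pvHas3 j.toNat || pvHas3 k.toNat) : Int)) acc := by
    apply PySem.List.foldl_congr_mem
    intro acc' j _
    exact PySem.List.foldl_if_add_one _ _ _
  rw [h1, PySem.List.foldl_add]
  congr 1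
  cases a
  · decide
  · decide

-- the minute/second double loop for a fixed nonnegative hour i
theorem pv_inner_hour {i : Int} (hi : 0 ≤ i) (acc : Int) :
    (PySem.List.pyRange 0 60 1).foldl (fun count j =>
      (PySem.List.pyRange 0 60 1).foldl (fun count k =>
        if PySem.Chars.isIn ['3']
            (PySem.Int.toChars i ++ PySem.Int.toChars j ++ PySem.Int.toChars k) then
          count + 1
        else count) count) acc
    = acc + (if pvHas3 i.toNat then 3600 else 1575) := by
  have h1 : (PySem.List.pyRange 0 60 1).foldl (fun count j =>
      (PySem.List.pyRange 0 60 1).foldl (fun count k =>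
        if PySem.Chars.isIn ['3']
            (PySem.Int.toChars i ++ PySem.Int.toChars j ++ PySem.Int.toChars k) then
          count + 1
        else count) count) acc
      = (PySem.List.pyRange 0 60 1).foldl (fun count j =>
          (PySem.List.pyRange 0 60 1).foldl (fun count k =>
            if (pvHas3 i.toNat || pvHas3 j.toNat || pvHas3 k.toNat) then count + 1 else count)
          count) acc := by
    apply PySem.List.foldl_congr_mem
    intro c1 j hj
    apply PySem.List.foldl_congr_mem
    intro c2 k hk
    have hj0 : 0 ≤ j := ((PySem.List.mem_pyRange_one).mp hj).1
    have hk0 : 0 ≤ k := ((PySem.List.mem_pyRange_one).mp hk).1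
    have hk3 : PySem.Chars.isIn ['3'] (PySem.Int.toChars k) = pvHas3 k.toNat := by
      have := pv_isIn_toChars hk0 []
      rw [List.append_nil] at this
      rw [this]
      have hnil : PySem.Chars.isIn ['3'] ([] : List Char) = false := rfl
      rw [hnil, Bool.or_false]
    have : PySem.Chars.isIn ['3']
        (PySem.Int.toChars i ++ PySem.Int.toChars j ++ PySem.Int.toChars k)
        = (pvHas3 i.toNat || pvHas3 j.toNat || pvHas3 k.toNat) := by
      rw [List.append_assoc, pv_isIn_toChars hi, pv_isIn_toChars hj0, hk3, Bool.or_assoc]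
    rw [this]
  rw [h1, pv_inner]

theorem pv_has3_split (q b : Nat) (hb : b < 10) :
    pvHas3 (10 * q + b) = ((b == 3) || pvHas3 q) := by
  by_cases hq : q = 0
  · subst hq
    simp only [Nat.mul_zero, Nat.zero_add]
    rw [pvHas3_eq]
    by_cases hb0 : b = 0
    · subst hb0; decide
    · simp only [hb0, if_false, Nat.mod_eq_of_lt hb, Nat.div_eq_of_lt hb]
      by_cases h3 : b = 3
      · simp [h3]
      · simp [h3, pvHas3, pvHas3Go]
  · have hne : ¬ (10 * q + b = 0) := by omega
    rw [pvHas3_eq]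
    have hmod : (10 * q + b) % 10 = b := by omega
    have hdiv : (10 * q + b) / 10 = q := by omega
    simp only [hne, if_false, hmod, hdiv]
    by_cases h3 : b = 3
    · simp [h3]
    · simp [h3]

-- no-'3' count of one decade [10q, 10q + d]
theorem pv_count_chunk (q d : Nat) (hd : d < 10) :
    ((List.range (d + 1)).map (fun b => 10 * q + b)).countP (fun x => !pvHas3 x)
      = if pvHas3 q then 0 else (if d < 3 then d + 1 else d) := by
  rw [List.countP_map]
  rw [List.countP_congr (q := fun b => !((b == 3) || pvHas3 q)) (fun b hb => by
    have hblt : b < 10 := by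
      have := List.mem_range.mp hb; omega
    simp [Function.comp, pv_has3_split q b hblt])]
  cases hq : pvHas3 q
  · simp only [Bool.or_false]
    interval_cases d <;> decide
  · simp

theorem pv_count_mul10 (q : Nat) :
    (List.range (10 * q)).countP (fun x => !pvHas3 x)
      = 9 * (List.range q).countP (fun x => !pvHas3 x) := by
  induction q with
  | zero => decide
  | succ q ih =>
    have h1 : 10 * (q + 1) = 10 * q + (9 + 1) := by ring
    rw [h1, List.range_add, List.countP_append, ih, pv_count_chunk q 9 (by omega)]
    rw [List.range_succ, List.countP_append]
    cases hq : pvHas3 q <;> simp [hq] <;> ring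

-- pvNo3 counts the no-'3' numbers in [0, m]
theorem pv_no3_correct (m : Nat) :
    pvNo3 m = (List.range (m + 1)).countP (fun x => !pvHas3 x) := by
  induction m using Nat.strong_induction_on with
  | _ m ih =>
    by_cases h10 : m < 10
    · rw [pvNo3]
      simp only [h10, if_true]
      interval_cases m <;> decide
    · rw [pvNo3]
      simp only [h10, if_false]
      rw [ih (m / 10 - 1) (by omega)]
      have hsub : m / 10 - 1 + 1 = m / 10 := by omega
      rw [hsub]
      have hm : m + 1 = 10 * (m / 10) + (m % 10 + 1) := by omega
      rw [hm, List.range_add, List.countP_append, pv_count_mul10,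
        pv_count_chunk (m / 10) (m % 10) (by omega)]

-- A's outer hour loop in closed form
theorem pv_outer (m : Nat) :
    (PySem.List.pyRange 0 (m : Int) 1).foldl (fun count i =>
      (PySem.List.pyRange 0 60 1).foldl (fun count j =>
        (PySem.List.pyRange 0 60 1).foldl (fun count k =>
          if PySem.Chars.isIn ['3']
              (PySem.Int.toChars i ++ PySem.Int.toChars j ++ PySem.Int.toChars k) then
            count + 1
          else count) count) count) 0
    = 3600 * (m : Int) - 2025 * ((List.range m).countP (fun x => !pvHas3 x) : Int) := by
  induction m with
  | zero =>
    simp [PySem.List.pyRange_one_eq_nil]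
  | succ m ih =>
    have hcast : ((m + 1 : Nat) : Int) = (m : Int) + 1 := by push_cast; ring
    rw [hcast, PySem.List.pyRange_one_succ_right (by positivity), List.foldl_append]
    simp only [List.foldl_cons, List.foldl_nil]
    rw [ih, pv_inner_hour (Int.natCast_nonneg m), Int.toNat_natCast,
      List.range_succ, List.countP_append]
    cases hq : pvHas3 m <;> simp [hq] <;> push_cast <;> ring

-- ===== VERDICT (by name: the statement is the Claim_ definition above) =====
theorem GetTime2_spec : Claim_equal_GetTime2 := by
  intro n _
  unfold Spec_GetTime2 GetTime2 GetTime2_alt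
  by_cases hneg : n < 0
  · rw [PySem.List.pyRange_one_eq_nil (a := 0) (b := n + 1) (by omega), if_pos hneg]
    rfl
  · rw [if_neg hneg]
    have hm : ((n + 1).toNat : Int) = n + 1 := by omega
    rw [← hm, pv_outer, pv_no3_correct]
    have h2 : (n + 1).toNat = n.toNat + 1 := by omega
    rw [h2]
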